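-- pv_equiv track=rewrite | github.com/Arcadenaker/lepl1401-missions | Mission-4/bioinfo.py | distances_matrice
-- ===== SOURCE A (Python) =====
-- def distance_h(s1, s2):
--     """
--     Calcule la distance de Hamming entre deux chaînes de caractères de même longueur.
--
--     Pré:
--         s1 (str): Première chaîne.
--         s2 (str): Deuxième chaîne.
--
--     Post:
--         int: La distance de Hamming entre les deux chaînes, ou None si les longueurs sont différentes.
--     """
--     #Si les deux chaines de caractères n'ont pas la même distance alors return
--     if len(s1) != len(s2):
--         return
--     dist = 0
--     for i in range(len(s1)):
--         if s1[i].lower() != s2[i].lower():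
--             dist +=1
--     return dist
--
-- def distances_matrice(liste_chaines):
--     """
--     Calcule une matrice des distances de Hamming entre toutes les paires de chaînes dans une liste.
--
--     Pré:
--         liste_chaines (list): Liste de chaînes de caractères.
--
--     Post:
--         list: Matrice des distances de Hamming entre toutes les paires de chaînes.
--     """
--     matrice = []
--     #Pour tous les éléments de la liste il crée une ligne
--     for i in range(len(liste_chaines)):
--         #Il vide la liste "line"
--         line = []
--         #Pour tout élément dans la liste, il va comparer la différence entre chaque élément
--         for u in range(len(liste_chaines)):
--             line.append(distance_h(liste_chaines[i], liste_chaines[u]))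
--         matrice.append(line)
--     return matrice
-- ===== SOURCE B (Python) =====
-- def distance_h(s1, s2):
--     if len(s1) != len(s2):
--         return
--     dist = 0
--     for i in range(len(s1)):
--         if s1[i].lower() != s2[i].lower():
--             dist += 1
--     return dist
--
-- def distances_matrice(liste_chaines):
--     # Exploit symmetry: each distance is computed once (j >= i); the lower
--     # triangle of row i is mirrored from column i of the earlier rows.
--     n = len(liste_chaines)
--     rows = []
--     for i in range(n):
--         line = [rows[j][i] for j in range(i)]
--         for j in range(i, n):
--             line.append(distance_h(liste_chaines[i], liste_chaines[j]))
--         rows.append(line)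
--     return rows
-- ===== Notes on version B (the rewrite author's own statement) =====
-- stated objective: alternative
-- what changed: B computes each Hamming distance only once for j >= i and mirrors the lower triangle from the column of earlier rows (distance is symmetric), instead of A's full all-pairs double loop; intended as a constant-factor saving, measured 1.87x at n=1024 but unconfirmed at the largest size.
import Mathlib
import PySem

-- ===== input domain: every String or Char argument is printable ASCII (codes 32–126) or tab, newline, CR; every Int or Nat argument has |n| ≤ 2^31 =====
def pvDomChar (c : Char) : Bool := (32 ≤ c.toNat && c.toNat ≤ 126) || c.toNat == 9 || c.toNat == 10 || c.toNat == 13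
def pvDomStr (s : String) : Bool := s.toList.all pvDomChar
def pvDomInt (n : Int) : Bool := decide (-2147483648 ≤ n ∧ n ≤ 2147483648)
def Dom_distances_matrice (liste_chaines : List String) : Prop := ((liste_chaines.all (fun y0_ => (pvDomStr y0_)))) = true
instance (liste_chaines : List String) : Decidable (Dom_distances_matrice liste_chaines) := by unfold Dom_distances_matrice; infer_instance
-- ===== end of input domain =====

-- B computes each pairwise distance once (only for j ≥ i) and mirrors the lower triangle,
-- using symmetry of the Hamming distance; A recomputes every pair twice.

-- ===== PORT A =====
-- port of distance_h: per-character s[i].lower() is PySem.Chars.lowerChar (exact on ASCII)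
def distance_h (s1 s2 : String) : Option Int :=
  if s1.toList.length ≠ s2.toList.length then none
  else some ((List.range s1.toList.length).foldl
    (fun dist i =>
      if PySem.Chars.lowerChar (s1.toList.getD i ' ') ≠ PySem.Chars.lowerChar (s2.toList.getD i ' ')
      then dist + 1 else dist) (0 : Int))

def distances_matrice (liste_chaines : List String) : List (List (Option Int)) :=
  (List.range liste_chaines.length).foldl
    (fun matrice i =>
      matrice ++ [(List.range liste_chaines.length).foldl
        (fun line u => line ++ [distance_h (liste_chaines.getD i "") (liste_chaines.getD u "")]) []])
    []

-- ===== PORT B =====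
def distances_matrice_alt (liste_chaines : List String) : List (List (Option Int)) :=
  let n := liste_chaines.length
  (List.range n).foldl
    (fun rows i =>
      let line := (List.range i).map (fun j => (rows.getD j []).getD i none)
      let line2 := (List.range' i (n - i)).foldl
        (fun line j => line ++ [distance_h (liste_chaines.getD i "") (liste_chaines.getD j "")]) line
      rows ++ [line2])
    []

-- ===== PRECONDITION & SPEC =====
def Spec_distances_matrice (liste_chaines : List String) (out : List (List (Option Int))) : Prop := out = distances_matrice_alt liste_chaines
instance (liste_chaines : List String) (out : List (List (Option Int))) : Decidable (Spec_distances_matrice liste_chaines out) := by unfold Spec_distances_matrice; infer_instance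

-- ===== CLAIM (what is proved, stated in full; the proofs are below) =====
def Claim_equal_distances_matrice : Prop := ∀ (liste_chaines : List String), Dom_distances_matrice liste_chaines → Spec_distances_matrice liste_chaines (distances_matrice liste_chaines)

-- ===== LEMMAS AND PROOFS =====

theorem foldl_append_map {α β : Type} (l : List α) (f : α → β) (acc : List β) :
    l.foldl (fun a x => a ++ [f x]) acc = acc ++ l.map f := by
  induction l generalizing acc with
  | nil => simp
  | cons x xs ih => simp [List.foldl_cons, ih]

theorem dh_symm (s t : String) : distance_h s t = distance_h t s := by
  unfold distance_h
  by_cases h : s.toList.length = t.toList.length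
  · simp only [h, if_neg (by omega : ¬ t.toList.length ≠ t.toList.length)]
    congr 1
    apply List.foldl_ext
    intro b a _
    by_cases hc : PySem.Chars.lowerChar (s.toList[a]?.getD ' ') = PySem.Chars.lowerChar (t.toList[a]?.getD ' ')
    · simp [hc]
    · simp [hc, Ne.symm hc]
  · rw [if_pos h, if_pos (fun h' => h h'.symm)]

theorem matA_eq (L : List String) :
    distances_matrice L =
      (List.range L.length).map (fun i =>
        (List.range L.length).map (fun u => distance_h (L.getD i "") (L.getD u ""))) := by
  unfold distances_matrice
  rw [foldl_append_map]
  simp only [List.nil_append]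
  congr 1
  funext i
  rw [foldl_append_map, List.nil_append]

theorem altB_prefix (L : List String) (k : Nat) (hk : k ≤ L.length) :
    (List.range k).foldl
      (fun rows i =>
        let line := (List.range i).map (fun j => (rows.getD j []).getD i none)
        let line2 := (List.range' i (L.length - i)).foldl
          (fun line j => line ++ [distance_h (L.getD i "") (L.getD j "")]) line
        rows ++ [line2])
      [] =
    (List.range k).map (fun i =>
      (List.range L.length).map (fun u => distance_h (L.getD i "") (L.getD u ""))) := by
  induction k with
  | zero => simp
  | succ k ih =>
    have hk' : k ≤ L.length := Nat.le_of_succ_le hk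
    rw [List.range_succ, List.foldl_append, ih hk', List.map_append]
    simp only [List.foldl_cons, List.foldl_nil, List.map_singleton]
    congr 1
    rw [foldl_append_map]
    have hline : (List.range k).map (fun j =>
        (((List.range k).map (fun i => (List.range L.length).map
          (fun u => distance_h (L.getD i "") (L.getD u "")))).getD j []).getD k none)
        = (List.range k).map (fun u => distance_h (L.getD k "") (L.getD u "")) := by
      apply List.map_congr_left
      intro j hj
      rw [List.mem_range] at hj
      have h1 : (((List.range k).map (fun i => (List.range L.length).map
          (fun u => distance_h (L.getD i "") (L.getD u "")))).getD j [])
          = (List.range L.length).map (fun u => distance_h (L.getD j "") (L.getD u "")) := by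
        rw [List.getD_eq_getElem?_getD]
        simp [hj]
      rw [h1, List.getD_eq_getElem?_getD]
      have hkn : k < L.length := Nat.lt_of_lt_of_le (Nat.lt_succ_self k) hk
      simp [hkn, dh_symm]
    rw [hline]
    rw [← List.map_append]
    congr 1
    have h2 := @List.range'_append 0 k (L.length - k) 1
    simp only [Nat.one_mul, Nat.zero_add] at h2
    rw [List.range_eq_range', List.range_eq_range', h2]
    congr 2
    omega

-- ===== VERDICT (by name: the statement is the Claim_ definition above) =====
theorem distances_matrice_spec : Claim_equal_distances_matrice := by
  intro L _
  unfold Spec_distances_matrice distances_matrice_alt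
  rw [matA_eq, altB_prefix L L.length (le_refl _)]
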